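-- pv_equiv track=rewrite | github.com/palak317/hackthecore_hackathon | app.py | is_public_ip
-- ===== SOURCE A (Python) =====
-- def is_public_ip(ip_value: str) -> bool:
--     try:
--         octets = [int(part) for part in ip_value.split('.')]
--         if len(octets) != 4 or any(part < 0 or part > 255 for part in octets):
--             return False
--         if octets[0] in {10, 127}:
--             return False
--         if octets[0] == 192 and octets[1] == 168:
--             return False
--         if octets[0] == 172 and 16 <= octets[1] <= 31:
--             return False
--         if octets[0] == 169 and octets[1] == 254:
--             return False
--         return True
--     except Exception:
--         return False
-- ===== SOURCE B (Python) =====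
-- _PRIVATE_BLOCKS = [(0x0A000000, 8), (0x7F000000, 8), (0xC0A80000, 16), (0xAC100000, 12), (0xA9FE0000, 16)]
--
-- def is_public_ip(ip_value: str) -> bool:
--     try:
--         octets = [int(part) for part in ip_value.split('.')]
--     except Exception:
--         return False
--     if len(octets) != 4:
--         return False
--     n = 0
--     for o in octets:
--         if o < 0 or o > 255:
--             return False
--         n = n * 256 + o
--     for net, prefix in _PRIVATE_BLOCKS:
--         shift = 2 ** (32 - prefix)
--         if n // shift == net // shift:
--             return False
--     return True
-- ===== Notes on version B (the rewrite author's own statement) =====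
-- stated objective: idiomatic
-- what changed: Replaces the per-octet branch ladder with packing the four octets into one 32-bit integer and testing it against a table of private CIDR blocks (net, prefix) by prefix comparison.
import Mathlib
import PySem

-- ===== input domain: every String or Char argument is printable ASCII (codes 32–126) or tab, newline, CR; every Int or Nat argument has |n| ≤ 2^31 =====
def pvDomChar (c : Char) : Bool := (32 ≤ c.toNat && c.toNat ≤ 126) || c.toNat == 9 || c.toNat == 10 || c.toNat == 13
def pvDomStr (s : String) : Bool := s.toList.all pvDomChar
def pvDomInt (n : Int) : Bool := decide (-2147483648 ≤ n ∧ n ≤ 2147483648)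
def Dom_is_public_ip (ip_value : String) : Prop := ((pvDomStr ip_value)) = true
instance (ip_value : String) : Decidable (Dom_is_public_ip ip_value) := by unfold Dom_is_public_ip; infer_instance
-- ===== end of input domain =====

-- B replaces A's per-octet branch ladder by packing the octets into one integer and
-- comparing its prefixes against a table of private CIDR blocks (same cost, table-driven).

-- ===== PORT A =====
def is_public_ip (ip_value : String) : Bool :=
  -- try: octets = [int(part) for part in ip_value.split('.')] ; except → False
  match (PySem.Chars.splitOn ip_value.toList ['.']).mapM PySem.Int.ofChars? with
  | none => false
  | some octets =>
    if octets.length ≠ 4 || octets.any (fun part => part < 0 || 255 < part) then false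
    else
      -- indices 0/1 are in range here (length = 4), so pyGetD's default never fires
      let o0 := PySem.List.pyGetD octets 0 0
      let o1 := PySem.List.pyGetD octets 1 0
      if o0 == 10 || o0 == 127 then false
      else if o0 == 192 && o1 == 168 then false
      else if o0 == 172 && (16 ≤ o1 && o1 ≤ 31) then false
      else if o0 == 169 && o1 == 254 then false
      else true

-- ===== PORT B =====
def pvBlocks : List (Int × Int) := [(0x0A000000, 8), (0x7F000000, 8), (0xC0A80000, 16), (0xAC100000, 12), (0xA9FE0000, 16)]

-- the 'for o in octets' loop of Source B: range-check and accumulate n, early return False = none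
def pvPack : List Int → Int → Option Int
  | [], n => some n
  | o :: rest, n => if o < 0 || 255 < o then none else pvPack rest (n * 256 + o)

def is_public_ip_alt (ip_value : String) : Bool :=
  match (PySem.Chars.splitOn ip_value.toList ['.']).mapM PySem.Int.ofChars? with
  | none => false
  | some octets =>
    if octets.length ≠ 4 then false
    else match pvPack octets 0 with
      | none => false
      | some n =>
        -- 2 ** (32 - prefix): every prefix in the table is ≤ 32, so the exponent is a Nat
        !pvBlocks.any (fun bp =>
          PySem.Int.floordiv n ((2:Int) ^ (32 - bp.2).toNat) ==
          PySem.Int.floordiv bp.1 ((2:Int) ^ (32 - bp.2).toNat))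

-- ===== PRECONDITION & SPEC =====
def Spec_is_public_ip (ip_value : String) (out : Bool) : Prop := out = is_public_ip_alt ip_value
instance (ip_value : String) (out : Bool) : Decidable (Spec_is_public_ip ip_value out) := by unfold Spec_is_public_ip; infer_instance

-- ===== CLAIM (what is proved, stated in full; the proofs are below) =====
def Claim_equal_is_public_ip : Prop := ∀ (ip_value : String), Dom_is_public_ip ip_value → Spec_is_public_ip ip_value (is_public_ip ip_value)

-- ===== LEMMAS AND PROOFS =====

-- the range-checking loop of B returns none when some octet is out of range
lemma pvPack_none (l : List Int) (hx : ∃ o ∈ l, o < 0 ∨ 255 < o) :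
    ∀ n, pvPack l n = none := by
  induction l with
  | nil => simp at hx
  | cons o rest ih =>
    intro n
    rcases hx with ⟨x, hmem, hxr⟩
    simp only [List.mem_cons] at hmem
    simp only [pvPack]
    split
    · rfl
    · next h =>
      simp only [Bool.or_eq_true, decide_eq_true_eq, not_or, not_lt] at h
      rcases hmem with rfl | hmem
      · omega
      · exact ih ⟨x, hmem, hxr⟩ _

theorem is_public_ip_spec : Claim_equal_is_public_ip := by
  intro ip _
  unfold Spec_is_public_ip is_public_ip is_public_ip_alt
  cases hm : (PySem.Chars.splitOn ip.toList ['.']).mapM PySem.Int.ofChars? with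
  | none => rfl
  | some octets =>
    rcases octets with _ | ⟨a, _ | ⟨b, _ | ⟨c, _ | ⟨d, _ | ⟨e, rest⟩⟩⟩⟩⟩
    · simp
    · simp
    · simp
    · simp
    · -- the four-octet case
      by_cases hA : (0 ≤ a ∧ a ≤ 255) ∧ (0 ≤ b ∧ b ≤ 255) ∧ (0 ≤ c ∧ c ≤ 255) ∧ (0 ≤ d ∧ d ≤ 255)
      · obtain ⟨⟨ha0, ha1⟩, ⟨hb0, hb1⟩, ⟨hc0, hc1⟩, ⟨hd0, hd1⟩⟩ := hA
        have hany : [a, b, c, d].any (fun part => part < 0 || 255 < part) = false := by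
          simp only [List.any_cons, List.any_nil, Bool.or_false, Bool.or_eq_false_iff,
            decide_eq_false_iff_not, not_lt]
          omega
        have ra : ¬((decide (a < 0) || decide (255 < a)) = true) := by simp only [Bool.or_eq_true, decide_eq_true_eq, not_or, not_lt]; omega
        have rb : ¬((decide (b < 0) || decide (255 < b)) = true) := by simp only [Bool.or_eq_true, decide_eq_true_eq, not_or, not_lt]; omega
        have rc : ¬((decide (c < 0) || decide (255 < c)) = true) := by simp only [Bool.or_eq_true, decide_eq_true_eq, not_or, not_lt]; omega
        have rd : ¬((decide (d < 0) || decide (255 < d)) = true) := by simp only [Bool.or_eq_true, decide_eq_true_eq, not_or, not_lt]; omega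
        have hpack : pvPack [a, b, c, d] 0 = some ((((0 * 256 + a) * 256 + b) * 256 + c) * 256 + d) := by
          simp only [pvPack, if_neg ra, if_neg rb, if_neg rc, if_neg rd]
        have u16 : ((16:Int)).toNat = 16 := rfl
        have u20 : ((20:Int)).toNat = 20 := rfl
        have u24 : ((24:Int)).toNat = 24 := rfl
        simp only [hpack, hany, List.length_cons, List.length_nil]
        norm_num [PySem.List.pyGetD, pvBlocks, u16, u20, u24]
        rw [Bool.eq_iff_iff]
        simp only [Bool.and_eq_true, Bool.or_eq_true, Bool.not_eq_true', beq_eq_false_iff_ne,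
          ne_eq, decide_eq_false_iff_not]
        omega
      · have hx : ∃ o ∈ [a, b, c, d], o < 0 ∨ 255 < o := by
          by_cases h1 : 0 ≤ a ∧ a ≤ 255
          · by_cases h2 : 0 ≤ b ∧ b ≤ 255
            · by_cases h3 : 0 ≤ c ∧ c ≤ 255
              · exact ⟨d, by simp, by omega⟩
              · exact ⟨c, by simp, by omega⟩
            · exact ⟨b, by simp, by omega⟩
          · exact ⟨a, by simp, by omega⟩
        have hany : [a, b, c, d].any (fun part => part < 0 || 255 < part) = true := by
          simp only [List.any_cons, List.any_nil, Bool.or_false, Bool.or_eq_true,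
            decide_eq_true_eq]
          omega
        simp [hany, pvPack_none _ hx]
    · simp
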